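-- pv_equiv track=rewrite | github.com/johnfr15/CTFs | 2025/AuvergnhackCTF/crypto/Planet Of Apes/crypto_implementations.py | a1z26
-- ===== SOURCE A (Python) =====
-- def a1z26(text, mode='encrypt'):
--     """A1Z26 cipher implementation"""
--     alphabet = 'abcdefghijklmnopqrstuvwxyz'
--     result = []
--
--     if mode == 'encrypt':
--         for char in text.lower():
--             if char.isalpha():
--                 index = alphabet.index(char) + 1
--                 result.append(str(index))
--             else:
--                 result.append(char)
--     else:  # decrypt
--         current_num = ''
--         for char in text:
--             if char.isdigit():
--                 current_num += char
--             else: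
--                 if current_num:
--                     try:
--                         index = int(current_num) - 1
--                         if 0 <= index < 26:
--                             result.append(alphabet[index])
--                         current_num = ''
--                     except ValueError:
--                         current_num = ''
--                         result.append(char)
--                 result.append(char)
--         if current_num:
--             try:
--                 index = int(current_num) - 1
--                 if 0 <= index < 26:
--                     result.append(alphabet[index])
--             except ValueError:
--                 pass
--
--     return ''.join(result)
-- ===== SOURCE B (Python) =====
-- def a1z26(text, mode='encrypt'):
--     """A1Z26 cipher implementation (run-tokenizing rewrite)"""
--     alphabet = 'abcdefghijklmnopqrstuvwxyz'
--     if mode == 'encrypt':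
--         return ''.join(str(alphabet.index(c) + 1) if c.isalpha() else c
--                        for c in text.lower())
--     # decrypt: scan maximal digit runs with an index, instead of a
--     # char-by-char accumulator; out-of-range runs are dropped, separators kept
--     out = []
--     i = 0
--     n = len(text)
--     while i < n:
--         if text[i].isdigit():
--             j = i
--             while j < n and text[j].isdigit():
--                 j += 1
--             v = int(text[i:j])
--             if 1 <= v <= 26:
--                 out.append(alphabet[v - 1])
--             i = j
--         else:
--             out.append(text[i])
--             i += 1
--     return ''.join(out)
-- ===== Notes on version B (the rewrite author's own statement) =====
-- stated objective: idiomatic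
-- what changed: The decrypt branch's stateful per-character digit accumulator is replaced by direct tokenization of maximal digit runs (inner scan + slice + int), and the encrypt loop by a join-of-comprehension; same asymptotic cost.
import Mathlib
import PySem

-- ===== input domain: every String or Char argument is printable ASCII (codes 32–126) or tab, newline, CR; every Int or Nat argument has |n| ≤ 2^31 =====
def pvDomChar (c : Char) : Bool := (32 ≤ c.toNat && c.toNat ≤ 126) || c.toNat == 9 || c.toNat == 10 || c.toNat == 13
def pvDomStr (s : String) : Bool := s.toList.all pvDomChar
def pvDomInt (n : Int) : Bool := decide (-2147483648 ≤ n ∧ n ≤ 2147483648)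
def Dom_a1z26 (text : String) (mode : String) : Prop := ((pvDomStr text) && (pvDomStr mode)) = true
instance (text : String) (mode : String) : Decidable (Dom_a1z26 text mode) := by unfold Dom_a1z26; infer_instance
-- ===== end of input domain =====

-- B replaces A's stateful digit-accumulator decrypt loop by index-free tokenization of
-- maximal digit runs, and A's encrypt loop by a per-character comprehension (idiomatic; same cost).

-- shared literal 'abcdefghijklmnopqrstuvwxyz'
def pvAlphabet : List Char := "abcdefghijklmnopqrstuvwxyz".toList

-- int(s) where s is a nonempty run of ASCII digits (the only strings either program applies
-- int() to: A's current_num and B's text[i:j] hold digits only, so int() cannot raise and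
-- equals the base-10 value; exact there).
def pvDigitsVal (cs : List Char) : Int :=
  ((cs.foldl (fun a c => a * 10 + (c.toNat - 48)) 0 : Nat) : Int)

-- ===== PORT A =====
-- the encrypt for-loop: result accumulator, one append per char
def a1z26EncLoopA : List Char → List Char → List Char
  | [], res => res
  | c :: rest, res =>
    if PySem.Chars.isalpha c then
      a1z26EncLoopA rest (res ++ PySem.Int.toChars (PySem.Chars.find pvAlphabet [c] + 1))
    else
      a1z26EncLoopA rest (res ++ [c])

-- the duplicated flush code 'index = int(current_num) - 1; if 0 <= index < 26: result.append(alphabet[index])'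
-- (the 'except ValueError' branches are unreachable: current_num holds only digits; the getD guard never fires)
def a1z26DecFlushA (cur res : List Char) : List Char :=
  let index := pvDigitsVal cur - 1
  if 0 ≤ index ∧ index < 26 then res ++ [(PySem.List.pyGet? pvAlphabet index).getD ' '] else res

-- the decrypt for-loop: state = (remaining chars, current_num, result)
def a1z26DecLoopA : List Char → List Char → List Char → List Char
  | [], cur, res => if cur ≠ [] then a1z26DecFlushA cur res else res
  | c :: rest, cur, res =>
    if PySem.Chars.isdigit c then
      a1z26DecLoopA rest (cur ++ [c]) res
    else
      if cur ≠ [] then a1z26DecLoopA rest [] (a1z26DecFlushA cur res ++ [c])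
      else a1z26DecLoopA rest [] (res ++ [c])

-- ''.join(result) is ported as direct char-list concatenation (result's pieces are joined with '')
def a1z26 (text : String) (mode : String) : String :=
  if mode == "encrypt" then String.ofList (a1z26EncLoopA (PySem.Chars.lower text.toList) [])
  else String.ofList (a1z26DecLoopA text.toList [] [])

-- ===== PORT B =====
-- per-character expression of B's encrypt comprehension
def a1z26EncB (c : Char) : List Char :=
  if PySem.Chars.isalpha c then PySem.Int.toChars (PySem.Chars.find pvAlphabet [c] + 1) else [c]

-- B's decrypt while-loop: at a digit, the inner scan takes the maximal digit run text[i:j]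
-- (takeWhile) and resumes at i = j (dropWhile); otherwise the char is copied
def a1z26DecB : List Char → List Char
  | [] => []
  | c :: rest =>
    if hdig : PySem.Chars.isdigit c then
      let run := List.takeWhile PySem.Chars.isdigit (c :: rest)
      let v := pvDigitsVal run
      (if 1 ≤ v ∧ v ≤ 26 then [(PySem.List.pyGet? pvAlphabet (v - 1)).getD ' '] else [])
        ++ a1z26DecB (List.dropWhile PySem.Chars.isdigit (c :: rest))
    else c :: a1z26DecB rest
termination_by cs => cs.length
decreasing_by
  · simp only [List.dropWhile_cons, hdig, if_true]
    exact Nat.lt_succ_of_le (List.length_dropWhile_le _ _)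
  · simp

def a1z26_alt (text : String) (mode : String) : String :=
  if mode == "encrypt" then String.ofList ((PySem.Chars.lower text.toList).flatMap a1z26EncB)
  else String.ofList (a1z26DecB text.toList)

-- ===== PRECONDITION & SPEC =====
def Spec_a1z26 (text : String) (mode : String) (out : String) : Prop := out = a1z26_alt text mode
instance (text : String) (mode : String) (out : String) : Decidable (Spec_a1z26 text mode out) := by unfold Spec_a1z26; infer_instance

-- ===== CLAIM (what is proved, stated in full; the proofs are below) =====
def Claim_equal_a1z26 : Prop := ∀ (text : String) (mode : String), Dom_a1z26 text mode → Spec_a1z26 text mode (a1z26 text mode)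

-- ===== LEMMAS AND PROOFS =====

-- unfold lemma for the well-founded recursion of a1z26DecB at a cons
theorem decB_cons (c : Char) (rest : List Char) :
    a1z26DecB (c :: rest) =
      if PySem.Chars.isdigit c then
        (if 1 ≤ pvDigitsVal (List.takeWhile PySem.Chars.isdigit (c :: rest)) ∧
            pvDigitsVal (List.takeWhile PySem.Chars.isdigit (c :: rest)) ≤ 26 then
          [(PySem.List.pyGet? pvAlphabet
              (pvDigitsVal (List.takeWhile PySem.Chars.isdigit (c :: rest)) - 1)).getD ' ']
        else [])
          ++ a1z26DecB (List.dropWhile PySem.Chars.isdigit (c :: rest))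
      else c :: a1z26DecB rest := by
  rw [a1z26DecB.eq_def]
  split <;> simp_all [dite_eq_ite]

theorem encA_eq_flatMap (cs : List Char) (res : List Char) :
    a1z26EncLoopA cs res = res ++ cs.flatMap a1z26EncB := by
  induction cs generalizing res with
  | nil => simp [a1z26EncLoopA]
  | cons c rest ih =>
    by_cases h : PySem.Chars.isalpha c = true <;>
      simp [a1z26EncLoopA, a1z26EncB, h, ih]

theorem decFlushA_eq (cur res : List Char) :
    a1z26DecFlushA cur res =
      res ++ (if 1 ≤ pvDigitsVal cur ∧ pvDigitsVal cur ≤ 26 then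
        [(PySem.List.pyGet? pvAlphabet (pvDigitsVal cur - 1)).getD ' '] else []) := by
  unfold a1z26DecFlushA
  rw [if_congr (show (0 ≤ pvDigitsVal cur - 1 ∧ pvDigitsVal cur - 1 < 26) ↔
        (1 ≤ pvDigitsVal cur ∧ pvDigitsVal cur ≤ 26) by omega) rfl rfl]
  split <;> simp

theorem decA_eq_decB (cs : List Char) :
    ∀ (cur res : List Char), (∀ x ∈ cur, PySem.Chars.isdigit x = true) →
      a1z26DecLoopA cs cur res = res ++ a1z26DecB (cur ++ cs) := by
  induction cs with
  | nil =>
    intro cur res hcur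
    match cur with
    | [] => simp [a1z26DecLoopA, a1z26DecB]
    | d :: ds =>
      have hd : PySem.Chars.isdigit d = true := hcur d (by simp)
      have htake : List.takeWhile PySem.Chars.isdigit (d :: ds) = d :: ds :=
        List.takeWhile_eq_self_iff.mpr hcur
      have hdrop : List.dropWhile PySem.Chars.isdigit (d :: ds) = [] := by
        rw [List.dropWhile_eq_nil_iff]; exact fun x hx => hcur x hx
      simp only [a1z26DecLoopA, List.append_nil, ne_eq, reduceCtorEq,
        not_false_eq_true, if_true, decFlushA_eq]
      rw [decB_cons]
      simp [hd, htake, hdrop, a1z26DecB]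
  | cons c rest ih =>
    intro cur res hcur
    by_cases hc : PySem.Chars.isdigit c = true
    · rw [show a1z26DecLoopA (c :: rest) cur res = a1z26DecLoopA rest (cur ++ [c]) res by
        simp [a1z26DecLoopA, hc]]
      rw [ih (cur ++ [c]) res (by
        intro x hx
        rcases List.mem_append.mp hx with h | h
        · exact hcur x h
        · simp at h; subst h; exact hc)]
      simp
    · match cur with
      | [] =>
        rw [show a1z26DecLoopA (c :: rest) [] res = a1z26DecLoopA rest [] (res ++ [c]) by
          simp [a1z26DecLoopA, hc]]
        rw [ih [] (res ++ [c]) (by simp)]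
        simp [decB_cons, hc]
      | d :: ds =>
        have hd : PySem.Chars.isdigit d = true := hcur d (by simp)
        have htakec : List.takeWhile PySem.Chars.isdigit ((d :: ds) ++ c :: rest)
            = d :: ds := by
          rw [List.takeWhile_append, List.takeWhile_eq_self_iff.mpr hcur]
          simp [hc]
        have hdropc : List.dropWhile PySem.Chars.isdigit ((d :: ds) ++ c :: rest)
            = c :: rest := by
          rw [List.dropWhile_append]
          have : List.dropWhile PySem.Chars.isdigit (d :: ds) = [] := by
            rw [List.dropWhile_eq_nil_iff]; exact fun x hx => hcur x hx
          simp [this, (show PySem.Chars.isdigit c = false by simpa using hc)]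
        rw [show a1z26DecLoopA (c :: rest) (d :: ds) res
            = a1z26DecLoopA rest [] (a1z26DecFlushA (d :: ds) res ++ [c]) by
          simp [a1z26DecLoopA, hc]]
        rw [ih [] _ (by simp), List.nil_append]
        rw [show (d :: ds) ++ c :: rest = d :: (ds ++ c :: rest) by simp]
        rw [decB_cons]
        simp only [← List.cons_append, htakec, hdropc, hd, if_true]
        rw [decB_cons]
        simp [hc, decFlushA_eq]
-- ===== VERDICT (by name: the statement is the Claim_ definition above) =====
theorem a1z26_spec : Claim_equal_a1z26 := by
  intro text mode _
  unfold Spec_a1z26 a1z26 a1z26_alt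
  by_cases h : mode == "encrypt"
  · simp only [h, if_true]
    rw [encA_eq_flatMap]
    simp
  · simp only [h, if_false, Bool.false_eq_true]
    rw [decA_eq_decB text.toList [] [] (by simp)]
    simp
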